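-- pv_equiv track=rewrite | github.com/ejmejm/multimo | preprocessing.py | check_oh
-- ===== SOURCE A (Python) =====
-- def check_oh(l):
--     one_count = 0
--     for item in l:
--         if item == 1:
--             if one_count >= 1:
--                 return False
--             elif one_count == 0:
--                 one_count += 1
--         elif item != 0:
--             return False
--
--     if one_count == 1:
--         return True
--     return False
-- ===== SOURCE B (Python) =====
-- def check_oh(l):
--     return l.count(1) == 1 and all(x == 0 or x == 1 for x in l)
-- ===== Notes on version B (the rewrite author's own statement) =====
-- stated objective: simpler
-- what changed: Replaced A's single fused loop with a mutable counter and two early returns by a declarative two-pass check: count occurrences of 1 and verify every element is 0 or 1.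
import Mathlib
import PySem

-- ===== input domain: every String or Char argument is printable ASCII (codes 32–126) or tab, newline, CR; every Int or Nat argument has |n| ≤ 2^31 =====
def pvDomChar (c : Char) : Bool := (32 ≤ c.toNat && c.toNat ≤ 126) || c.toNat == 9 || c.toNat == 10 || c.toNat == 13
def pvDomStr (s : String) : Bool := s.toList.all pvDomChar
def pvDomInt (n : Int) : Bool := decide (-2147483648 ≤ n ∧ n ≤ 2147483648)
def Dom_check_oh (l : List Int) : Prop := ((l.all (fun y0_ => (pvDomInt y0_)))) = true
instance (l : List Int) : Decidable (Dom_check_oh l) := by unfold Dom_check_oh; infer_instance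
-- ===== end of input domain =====

-- B replaces A's fused counter loop with two declarative passes (count of 1s, all-elements-are-0-or-1); objective: simpler.


-- ===== PORT A =====
-- literal port of A: fused loop carrying one_count, early returns modelled by the recursion
def check_oh_go (l : List Int) (one_count : Int) : Bool :=
  match l with
  | [] => if one_count == 1 then true else false
  | item :: rest =>
      if item == 1 then
        if one_count ≥ 1 then false
        else if one_count == 0 then check_oh_go rest (one_count + 1)
        else check_oh_go rest one_count
      else if item ≠ 0 then false
      else check_oh_go rest one_count

def check_oh (l : List Int) : Bool := check_oh_go l 0

-- ===== PORT B =====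
-- B: two-pass declarative check (count + all)
def check_oh_alt (l : List Int) : Bool :=
  PySem.List.count l 1 == 1 && l.all (fun x => x == 0 || x == 1)

-- ===== PRECONDITION & SPEC =====
def Spec_check_oh (l : List Int) (out : Bool) : Prop := out = check_oh_alt l
instance (l : List Int) (out : Bool) : Decidable (Spec_check_oh l out) := by unfold Spec_check_oh; infer_instance

-- ===== CLAIM (what is proved, stated in full; the proofs are below) =====
def Claim_equal_check_oh : Prop := ∀ (l : List Int), Dom_check_oh l → Spec_check_oh l (check_oh l)

-- ===== LEMMAS AND PROOFS =====

-- ===== VERDICT (by name: the statement is the Claim_ definition above) =====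
theorem check_oh_go_eq (l : List Int) (c : Int) (hc : c = 0 ∨ c = 1) :
    check_oh_go l c = ((c + (List.count 1 l : Int) == 1) && l.all (fun x => x == 0 || x == 1)) := by
  induction l generalizing c with
  | nil => rcases hc with h | h <;> subst h <;> simp [check_oh_go]
  | cons a rest ih =>
    simp only [check_oh_go, List.count_cons, List.all_cons]
    by_cases ha : a = 1
    · subst ha
      rcases hc with h | h <;> subst h
      · rw [if_pos (by decide), if_neg (by omega), if_pos (by decide),
            show (0:Int)+1 = 1 from rfl, ih 1 (Or.inr rfl)]
        rw [Bool.eq_iff_iff]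
        simp only [Bool.and_eq_true, beq_iff_eq, Bool.or_eq_true, List.all_eq_true]
        push_cast
        constructor
        · intro h; exact ⟨by omega, by tauto, h.2⟩
        · intro h; exact ⟨by omega, h.2.2⟩
      · rw [if_pos (by decide), if_pos (by omega)]
        rw [Bool.eq_iff_iff]
        simp only [Bool.and_eq_true, beq_iff_eq]
        push_cast
        rw [false_iff]
        intro h
        exact absurd h.1 (by omega)
    · have ha0 : (a == 1) = false := by simp [ha]
      by_cases hz : a = 0
      · subst hz
        rw [if_neg (by decide), if_neg (by decide), ih c hc]
        simp
      · rw [if_neg (by simp [ha]), if_pos (by simp [hz])]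
        simp [ha, hz]

theorem check_oh_spec : Claim_equal_check_oh := by
  intro l _
  unfold Spec_check_oh check_oh check_oh_alt
  rw [check_oh_go_eq l 0 (Or.inl rfl), PySem.List.count_eq]
  rw [Bool.eq_iff_iff]
  simp only [Bool.and_eq_true, beq_iff_eq]
  constructor <;> intro h <;> exact ⟨by omega, h.2⟩
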